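-- pv_equiv track=rewrite | github.com/Arcturae/cryptogr | all.py | preprocess_plaintext
-- ===== SOURCE A (Python) =====
-- def preprocess_plaintext(text):
--     text = ''.join(filter(str.isalpha, text)).lower().replace('j', 'i')
--     processed = ''
--     i = 0
--     while i < len(text):
--         processed += text[i]
--         if i+1 < len(text) and text[i] == text[i+1]:
--             processed += 'x'
--         elif i+1 < len(text):
--             processed += text[i+1]
--             i += 1
--         i += 1
--     if len(processed) % 2 != 0:
--         processed += 'x'
--     return processed
-- ===== SOURCE B (Python) =====
-- def preprocess_plaintext(text):
--     out = []
--     pending = None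
--     for ch in text:
--         if not ch.isalpha():
--             continue
--         c = ch.lower()
--         if c == 'j':
--             c = 'i'
--         if pending is None:
--             pending = c
--         elif pending == c:
--             out.append(pending)
--             out.append('x')
--             pending = c
--         else:
--             out.append(pending)
--             out.append(c)
--             pending = None
--     if pending is not None:
--         out.append(pending)
--         out.append('x')
--     return ''.join(out)
-- ===== Notes on version B (the rewrite author's own statement) =====
-- stated objective: faster
-- what changed: A cleans the whole string first and then runs an index-based while loop with i+1 lookahead, growing the result by repeated string concatenation; B makes one fused pass over the raw characters, cleaning each char on the fly and carrying the first letter of the current incomplete pair as state, appending to a list joined once at the end.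
import Mathlib
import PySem

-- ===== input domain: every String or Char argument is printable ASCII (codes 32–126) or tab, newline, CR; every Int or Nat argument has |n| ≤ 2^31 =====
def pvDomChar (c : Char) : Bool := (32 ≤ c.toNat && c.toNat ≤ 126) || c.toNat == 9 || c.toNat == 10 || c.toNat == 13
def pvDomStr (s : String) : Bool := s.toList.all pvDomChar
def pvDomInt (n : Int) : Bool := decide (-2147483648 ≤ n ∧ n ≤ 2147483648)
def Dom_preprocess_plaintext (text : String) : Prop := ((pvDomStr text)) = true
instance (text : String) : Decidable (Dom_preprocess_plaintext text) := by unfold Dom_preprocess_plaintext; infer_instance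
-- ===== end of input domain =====

-- B replaces A's clean-then-index-lookahead two-phase loop (which grows the result by repeated string concatenation) by one fused pass carrying the first letter of the current pair and joining a list once; a timing run measured B faster.

-- ===== PORT A =====
-- the while loop: processed += text[i]; lookahead at i+1; i advances by 1 or 2
-- 'processed += text[i]' is inlined into each branch's accumulator
def paLoop (t : List Char) (i : Nat) (processed : List Char) : List Char :=
  if h : i < t.length then
    if h2 : i + 1 < t.length then
      if t[i] = t[i+1] then paLoop t (i+1) (processed ++ [t[i]] ++ ['x'])
      else paLoop t (i+2) (processed ++ [t[i]] ++ [t[i+1]])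
    else paLoop t (i+1) (processed ++ [t[i]])
  else processed
termination_by t.length - i

def preprocess_plaintext (text : String) : String :=
  -- ''.join(filter(str.isalpha, text)).lower().replace('j', 'i')
  let t := PySem.Chars.replace (PySem.Chars.lower (text.toList.filter PySem.Chars.isalpha)) ['j'] ['i']
  let processed := paLoop t 0 []
  let processed := if processed.length % 2 ≠ 0 then processed ++ ['x'] else processed
  String.mk processed

-- ===== PORT B =====
-- loop body of Source B: skip non-alpha, clean the char, update (out, pending)
def pbStep (st : List Char × Option Char) (ch : Char) : List Char × Option Char :=
  if PySem.Chars.isalpha ch then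
    let c := PySem.Chars.lowerChar ch
    let c := if c = 'j' then 'i' else c
    match st.2 with
    | none => (st.1, some c)
    | some p => if p = c then (st.1 ++ [p, 'x'], some c) else (st.1 ++ [p, c], none)
  else st

def preprocess_plaintext_alt (text : String) : String :=
  let st := text.toList.foldl pbStep (([] : List Char), (none : Option Char))
  match st.2 with
  | none => String.mk st.1
  | some p => String.mk (st.1 ++ [p, 'x'])

-- ===== PRECONDITION & SPEC =====
def Spec_preprocess_plaintext (text : String) (out : String) : Prop := out = preprocess_plaintext_alt text
instance (text : String) (out : String) : Decidable (Spec_preprocess_plaintext text out) := by unfold Spec_preprocess_plaintext; infer_instance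

-- ===== CLAIM (what is proved, stated in full; the proofs are below) =====
def Claim_equal_preprocess_plaintext : Prop := ∀ (text : String), Dom_preprocess_plaintext text → Spec_preprocess_plaintext text (preprocess_plaintext text)

-- ===== LEMMAS AND PROOFS =====

-- the per-character cleaning both programs perform
def pvF (ch : Char) : Char := if PySem.Chars.lowerChar ch = 'j' then 'i' else PySem.Chars.lowerChar ch

def pvClean (cs : List Char) : List Char := (cs.filter PySem.Chars.isalpha).map pvF

-- B's state machine on already-cleaned characters
def pvStep (st : List Char × Option Char) (c : Char) : List Char × Option Char :=
  match st.2 with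
  | none => (st.1, some c)
  | some p => if p = c then (st.1 ++ [p, 'x'], some c) else (st.1 ++ [p, c], none)

def pvFin (st : List Char × Option Char) : List Char :=
  match st.2 with
  | none => st.1
  | some p => st.1 ++ [p, 'x']

-- suffix-recursion form of A's while loop
def pvLoopS : List Char → List Char
  | [] => []
  | [c] => [c]
  | c :: d :: rest => if c = d then c :: 'x' :: pvLoopS (d :: rest) else c :: d :: pvLoopS rest

def pvPad (l : List Char) : List Char := if l.length % 2 ≠ 0 then l ++ ['x'] else l

lemma replace_go_single (fuel : Nat) (l acc : List Char) (h : l.length ≤ fuel) :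
    PySem.Chars.replace.go ['j'] ['i'] fuel l acc
      = acc.reverse ++ l.map (fun c => if c = 'j' then 'i' else c) := by
  induction fuel generalizing l acc with
  | zero =>
    have : l = [] := List.eq_nil_of_length_eq_zero (Nat.le_zero.mp h)
    subst this; simp [PySem.Chars.replace.go]
  | succ n ih =>
    cases l with
    | nil => simp [PySem.Chars.replace.go]
    | cons c t =>
      rw [PySem.Chars.replace.go]
      by_cases hc : c = 'j'
      · subst hc
        have hp : List.isPrefixOf ['j'] ('j' :: t) = true := by
          simp [List.isPrefixOf]
        simp only [hp, if_pos]
        rw [ih _ _ (by simpa using Nat.le_of_succ_le_succ h)]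
        simp
      · have hp : List.isPrefixOf ['j'] (c :: t) = false := by
          rw [List.isPrefixOf_cons₂]
          have hjc : ¬ 'j' = c := fun h => hc h.symm
          simp [hjc]
        simp only [hp, Bool.false_eq_true, if_neg, not_false_iff]
        rw [ih _ _ (by simpa using Nat.le_of_succ_le_succ h)]
        simp [hc]

lemma replace_single (l : List Char) :
    PySem.Chars.replace l ['j'] ['i'] = l.map (fun c => if c = 'j' then 'i' else c) := by
  rw [PySem.Chars.replace]
  simp only [List.isEmpty_cons, Bool.false_eq_true, if_neg, not_false_iff]
  rw [replace_go_single l.length l [] (le_refl _)]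
  simp

lemma clean_eq (cs : List Char) :
    PySem.Chars.replace (PySem.Chars.lower (cs.filter PySem.Chars.isalpha)) ['j'] ['i']
      = pvClean cs := by
  rw [replace_single, PySem.Chars.lower, List.map_map]
  rfl

lemma paLoop_eq_loopS (t : List Char) (i : Nat) (acc : List Char) :
    paLoop t i acc = acc ++ pvLoopS (t.drop i) := by
  induction i, acc using paLoop.induct (t := t) with
  | case1 i acc h h2 heq ih =>
    have d1 : t.drop i = t[i] :: t.drop (i+1) := (List.getElem_cons_drop h).symm
    have d2 : t.drop (i+1) = t[i+1] :: t.drop (i+2) := (List.getElem_cons_drop h2).symm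
    rw [paLoop]
    simp only [dif_pos h, dif_pos h2, if_pos heq]
    rw [ih, d1, d2]
    simp [pvLoopS, heq]
  | case2 i acc h h2 heq ih =>
    have d1 : t.drop i = t[i] :: t.drop (i+1) := (List.getElem_cons_drop h).symm
    have d2 : t.drop (i+1) = t[i+1] :: t.drop (i+2) := (List.getElem_cons_drop h2).symm
    rw [paLoop]
    simp only [dif_pos h, dif_pos h2, if_neg heq]
    rw [ih, d1, d2]
    simp [pvLoopS, heq]
  | case3 i acc h h2 ih =>
    have d1 : t.drop i = t[i] :: t.drop (i+1) := (List.getElem_cons_drop h).symm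
    have d2 : t.drop (i+1) = ([] : List Char) := List.drop_eq_nil_of_le (by omega)
    rw [paLoop]
    simp only [dif_pos h, dif_neg h2]
    rw [ih, d1, d2]
    simp [pvLoopS]
  | case4 i acc h =>
    rw [paLoop]
    simp only [dif_neg h]
    rw [List.drop_eq_nil_of_le (by omega)]
    simp [pvLoopS]

lemma pad_cons_cons (a b : Char) (l : List Char) :
    pvPad (a :: b :: l) = a :: b :: pvPad l := by
  have h2 : (a :: b :: l).length % 2 = l.length % 2 := by
    simp only [List.length_cons]; omega
  simp only [pvPad, h2]
  split_ifs <;> simp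

lemma machine_eq (ds : List Char) : ∀ (out : List Char),
    pvFin (ds.foldl pvStep (out, none)) = out ++ pvPad (pvLoopS ds) := by
  induction ds using pvLoopS.induct with
  | case1 => intro out; simp [pvFin, pvPad, pvLoopS]
  | case2 c => intro out; simp [pvFin, pvPad, pvLoopS, pvStep, List.foldl]
  | case3 c rest ih =>
    intro out
    have step2 : pvStep (pvStep (out, none) c) c = (out ++ [c, 'x'], some c) := by
      simp [pvStep]
    rw [List.foldl_cons, List.foldl_cons, step2]
    have : (rest.foldl pvStep (out ++ [c, 'x'], some c))
         = ((c :: rest).foldl pvStep (out ++ [c, 'x'], none)) := by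
      rw [List.foldl_cons]; rfl
    rw [this, ih (out ++ [c, 'x'])]
    rw [pvLoopS, if_pos rfl, pad_cons_cons]
    simp
  | case4 c d rest heq ih =>
    intro out
    have step2 : pvStep (pvStep (out, none) c) d = (out ++ [c, d], none) := by
      simp [pvStep, heq]
    rw [List.foldl_cons, List.foldl_cons, step2, ih (out ++ [c, d])]
    rw [pvLoopS, if_neg heq, pad_cons_cons]
    simp

lemma fold_fusion (cs : List Char) : ∀ (st : List Char × Option Char),
    cs.foldl pbStep st = (pvClean cs).foldl pvStep st := by
  induction cs with
  | nil => intro st; simp [pvClean]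
  | cons ch t ih =>
    intro st
    by_cases ha : PySem.Chars.isalpha ch = true
    · have : pbStep st ch = pvStep st (pvF ch) := by
        simp [pbStep, pvStep, pvF, ha]
      rw [List.foldl_cons, this, ih]
      simp [pvClean, List.filter_cons, ha]
    · have : pbStep st ch = st := by simp [pbStep, ha]
      rw [List.foldl_cons, this, ih]
      simp [pvClean, List.filter_cons, ha]

-- ===== VERDICT (by name: the statement is the Claim_ definition above) =====
theorem preprocess_plaintext_spec : Claim_equal_preprocess_plaintext := by
  intro text _
  unfold Spec_preprocess_plaintext preprocess_plaintext preprocess_plaintext_alt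
  dsimp only
  rw [clean_eq, fold_fusion, paLoop_eq_loopS]
  simp only [List.drop_zero, List.nil_append]
  have h := machine_eq (pvClean text.toList) []
  simp only [List.nil_append] at h
  change String.mk (pvPad (pvLoopS (pvClean text.toList))) = _
  rw [← h]
  cases hst : ((pvClean text.toList).foldl pvStep ([], none)) with
  | mk o p => cases p <;> rfl
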